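-- pv_equiv track=rewrite | github.com/shahsalonik/AI-2022-23 | Unit 6/2 Shah Saloni hill_climbing.py | decode_func
-- ===== SOURCE A (Python) =====
-- def decode_func(to_decipher_string, decipher_dict_passed):
--     to_decipher_string = to_decipher_string.upper()
--     new_string = ""
--     for char in to_decipher_string:
--         if char in decipher_dict_passed:
--             new_char = decipher_dict_passed[char]
--             new_string += new_char
--         else:
--             new_string += char
--     return new_string
-- ===== SOURCE B (Python) =====
-- def decode_func(to_decipher_string, decipher_dict_passed):
--     up = to_decipher_string.upper()
--     frags = list(up)
--     for key, val in decipher_dict_passed.items():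
--         if len(key) == 1:           # a multi-character key can never equal a character
--             for i, ch in enumerate(up):
--                 if ch == key:
--                     frags[i] = val
--     return "".join(frags)
-- ===== Notes on version B (the rewrite author's own statement) =====
-- stated objective: alternative
-- what changed: Inverts the traversal: instead of scanning the string once with a dict lookup per character, B loops over the dictionary entries and scatter-writes each value into a positional fragment array at every position holding that key, then joins the fragments.
import Mathlib
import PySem

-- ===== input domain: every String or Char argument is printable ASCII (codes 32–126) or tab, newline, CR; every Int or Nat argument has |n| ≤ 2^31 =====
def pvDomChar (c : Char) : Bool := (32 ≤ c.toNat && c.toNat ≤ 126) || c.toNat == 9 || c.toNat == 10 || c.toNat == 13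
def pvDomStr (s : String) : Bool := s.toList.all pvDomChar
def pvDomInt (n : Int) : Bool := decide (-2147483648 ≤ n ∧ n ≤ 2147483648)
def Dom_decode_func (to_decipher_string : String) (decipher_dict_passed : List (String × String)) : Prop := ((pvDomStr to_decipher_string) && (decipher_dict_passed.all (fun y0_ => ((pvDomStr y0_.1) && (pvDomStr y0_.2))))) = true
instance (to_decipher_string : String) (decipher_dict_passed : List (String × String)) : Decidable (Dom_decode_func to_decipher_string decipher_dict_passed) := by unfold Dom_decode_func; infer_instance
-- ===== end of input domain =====

-- B inverts the traversal: key-major scatter of each dict value into positional fragments,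
-- then one join (same return value; alternative algorithm, not claimed faster).


-- ===== PORT A =====
-- The growing result string is kept as List Char (Lean's String.append is kernel-opaque);
-- `char in dict` then `dict[char]` is ported as one first-match get? — exact for a dict.
def decode_func (to_decipher_string : String) (decipher_dict_passed : List (String × String)) : String :=
  let d : PySem.Dict String String := PySem.Dict.mk decipher_dict_passed
  String.ofList ((PySem.Str.upper to_decipher_string).toList.foldl
    (fun new_string char =>
      match d.get? (String.ofList [char]) with
      | some new_char => new_string ++ new_char.toList
      | none => new_string ++ [char]) [])

-- ===== PORT B =====
-- 'if len(key) == 1: for i, ch in enumerate(up): if ch == key: frags[i] = val' —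
-- positional update of frags, exact as a positionwise map over up zipped with frags.
def pvScatter (up : List Char) (frags : List String) (kv : String × String) : List String :=
  if PySem.Str.len kv.1 == 1 then
    (up.zip frags).map (fun p => if String.ofList [p.1] == kv.1 then kv.2 else p.2)
  else frags

def decode_func_alt (to_decipher_string : String) (decipher_dict_passed : List (String × String)) : String :=
  let up := (PySem.Str.upper to_decipher_string).toList
  let frags := up.map (fun c => String.ofList [c])      -- list(up)
  let frags := decipher_dict_passed.foldl (pvScatter up) frags
  String.ofList ((frags.map String.toList).flatten)     -- "".join(frags)

-- ===== PRECONDITION & SPEC =====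
-- Pre_ excludes association lists with duplicate keys: those represent no Python dict (A is
-- always called with a dict), and there A's first-match lookup and B's scatter overwrite
-- (last match wins) are both accidental orders.
def Pre_decode_func (to_decipher_string : String) (decipher_dict_passed : List (String × String)) : Prop :=
  (decipher_dict_passed.map Prod.fst).Nodup
instance (to_decipher_string : String) (decipher_dict_passed : List (String × String)) : Decidable (Pre_decode_func to_decipher_string decipher_dict_passed) := by unfold Pre_decode_func; infer_instance
def pvWitness_decode_func : String × (List (String × String)) := ("aBc!", [("A", "x"), ("C", "yz"), ("no", "p")])

def Spec_decode_func (to_decipher_string : String) (decipher_dict_passed : List (String × String)) (out : String) : Prop := out = decode_func_alt to_decipher_string decipher_dict_passed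
instance (to_decipher_string : String) (decipher_dict_passed : List (String × String)) (out : String) : Decidable (Spec_decode_func to_decipher_string decipher_dict_passed out) := by unfold Spec_decode_func; infer_instance

-- ===== CLAIM =====
def Claim_equal_decode_func : Prop := ∀ (to_decipher_string : String) (decipher_dict_passed : List (String × String)), Dom_decode_func to_decipher_string decipher_dict_passed → Pre_decode_func to_decipher_string decipher_dict_passed → Spec_decode_func to_decipher_string decipher_dict_passed (decode_func to_decipher_string decipher_dict_passed)

-- ===== LEMMAS AND PROOFS =====

-- one scatter pass over frags = up.map g rewrites it to up.map (pointwise update of g)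
lemma scatter_map (up : List Char) (g : Char → String) (k v : String) :
    pvScatter up (up.map g) (k, v) =
      up.map (fun c => if String.ofList [c] == k then v else g c) := by
  unfold pvScatter
  by_cases hlen : (PySem.Str.len k == 1) = true
  · rw [if_pos hlen]
    induction up with
    | nil => rfl
    | cons c rest ih => exact congrArg₂ List.cons rfl ih
  · rw [if_neg hlen]
    have hfalse : ∀ c : Char, (String.ofList [c] == k) = false := by
      intro c
      simp only [beq_eq_false_iff_ne, ne_eq]
      intro h
      apply hlen
      rw [← h]
      simp [PySem.Str.len_eq]
    symm
    apply List.map_congr_left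
    intro c _
    rw [hfalse c]; rfl

-- the whole key-major fold equals the char-major first-match lookup when keys are distinct
lemma scatter_fold (up : List Char) (d : List (String × String)) (g : Char → String)
    (hnd : (d.map Prod.fst).Nodup) :
    d.foldl (pvScatter up) (up.map g) =
      up.map (fun c =>
        match (PySem.Dict.mk d).get? (String.ofList [c]) with
        | some v => v
        | none => g c) := by
  induction d generalizing g with
  | nil => simp [PySem.Dict.get?]
  | cons kv rest ih =>
    obtain ⟨k, v⟩ := kv
    simp only [List.map_cons, List.nodup_cons] at hnd
    obtain ⟨hk, hrest⟩ := hnd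
    simp only [List.foldl_cons, scatter_map]
    rw [ih _ hrest]
    apply List.map_congr_left
    intro c _
    rw [PySem.Dict.get?_mk_cons]
    by_cases hke : k = String.ofList [c]
    · have hnone : (PySem.Dict.mk rest).get? (String.ofList [c]) = none := by
        rw [PySem.Dict.get?_eq_none_iff_not_mem_keys, PySem.Dict.keys_mk]
        rw [hke] at hk; exact hk
      simp [hke, hnone]
    · have hne : (String.ofList [c] == k) = false := by simp [Ne.symm hke]
      have hne' : (k == String.ofList [c]) = false := by simp [hke]
      rw [hne, hne']
      cases (PySem.Dict.mk rest).get? (String.ofList [c]) <;> rfl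

-- ===== VERDICT =====
theorem decode_func_spec : Claim_equal_decode_func := by
  intro s d _ hpre
  unfold Spec_decode_func decode_func decode_func_alt
  simp only []
  rw [scatter_fold _ _ _ hpre]
  have hfun : (fun (new_string : List Char) (char : Char) =>
        match (PySem.Dict.mk d).get? (String.ofList [char]) with
        | some new_char => new_string ++ new_char.toList
        | none => new_string ++ [char]) =
      fun new_string char => new_string ++
        (match (PySem.Dict.mk d).get? (String.ofList [char]) with
         | some new_char => new_char.toList
         | none => [char]) := by
    funext acc char
    cases (PySem.Dict.mk d).get? (String.ofList [char]) <;> rfl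
  rw [hfun, PySem.List.foldl_append_eq_flatMap, List.nil_append]
  congr 1
  rw [List.map_map, ← List.flatMap_def]
  apply List.flatMap_congr
  intro c _
  cases h : (PySem.Dict.mk d).get? (String.ofList [c]) with
  | some w => simp [h]
  | none => simp [h, String.toList_ofList]
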